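-- pv_equiv track=rewrite | github.com/davidmzeng/beat-the-landlord | beat_the_landlord.py | is_sequence_of_triplets_with_pairs
-- ===== SOURCE A (Python) =====
-- RANK_ORDER = ("3", "4", "5", "6", "7", "8", "9", "10", "J", "Q", "K", "A", "2", "B", "R")
--
-- def sorted_cards(cards):
--     """
--     Takes cards as an argument and returns a new group of sorted cards
--     """
--     for card in cards: # check for invalid cards
--         if card not in RANK_ORDER:
--             raise ValueError("invalid card found")
--     sorted_result = []
--     for rank in RANK_ORDER: # iterate in sorted order
--         for card in cards:
--             if card == rank:
--                 sorted_result.append(card)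
--     return sorted_result
--
-- def get_rank(card):
--     """
--     Takes a card as an argument and returns a value representing its relative
--     rank compared with other cards
--     """
--     if card not in RANK_ORDER: # check that card isn't invalid
--         raise ValueError("invalid card")
--     return RANK_ORDER.index(card)
--
-- def is_sequence_of_triplets_with_pairs(combo):
--     """
--     Takes a combo as an argument and returns True if it is a "sequence of triplets with pairs" combo type,
--     returns False otherwise
--     """
--     for card in combo: # check for invalid cards
--         if card not in RANK_ORDER:
--             return False
--     rank_counts = {}
--     for card in combo: # put combo into a dictionary representing frequency of each card
--         if card not in rank_counts:
--             rank_counts[card] = 1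
--         else:
--             rank_counts[card] += 1
--     for card in combo:
--         if rank_counts[card] != 3 and rank_counts[card] != 2: # check that we have only triplets and pairs
--             return False
--     triplets_ranks = []
--     pairs_ranks = []
--     for rank in rank_counts: # get ranks of triplets and ranks of pairs
--         if rank_counts[rank] == 3:
--             triplets_ranks.append(rank)
--         elif rank_counts[rank] == 2:
--             pairs_ranks.append(rank)
--     if len(triplets_ranks) != len(pairs_ranks): # number of triplets must match number of pairs
--         return False
--     if "2" in triplets_ranks: # check for invalid cards in triplets
--         return False
--     if len(triplets_ranks) < 2: # check for at least 2 triplets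
--         return False
--     sorted_triplets_ranks = sorted_cards(triplets_ranks)
--     for i in range(len(sorted_triplets_ranks) - 1): # check triplets are consecutive
--         if get_rank(sorted_triplets_ranks[i]) != get_rank(sorted_triplets_ranks[i + 1]) - 1:
--             return False
--     return True
-- ===== SOURCE B (Python) =====
-- RANK_ORDER = ("3", "4", "5", "6", "7", "8", "9", "10", "J", "Q", "K", "A", "2", "B", "R")
--
-- def is_sequence_of_triplets_with_pairs(combo):
--     counts = {}
--     for card in combo:
--         counts[card] = counts.get(card, 0) + 1
--     trip_idxs = []
--     num_pairs = 0
--     for rank, c in counts.items():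
--         if rank not in RANK_ORDER:
--             return False
--         if c == 3:
--             if rank == "2":
--                 return False
--             trip_idxs.append(RANK_ORDER.index(rank))
--         elif c == 2:
--             num_pairs += 1
--         else:
--             return False
--     if len(trip_idxs) != num_pairs or len(trip_idxs) < 2:
--         return False
--     return max(trip_idxs) - min(trip_idxs) == len(trip_idxs) - 1
-- ===== Notes on version B (the rewrite author's own statement) =====
-- stated objective: simpler
-- what changed: B counts cards in one dict pass, then folds validation, triplet/pair splitting and the '2'-triplet guard into a single loop over the counter's items (collecting triplet rank indices instead of rank strings), and replaces A's sort-and-adjacent-scan consecutiveness test by a max(idx)-min(idx)==len-1 contiguity check on the distinct indices, eliminating sorted_cards and get_rank entirely.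
import Mathlib
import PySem

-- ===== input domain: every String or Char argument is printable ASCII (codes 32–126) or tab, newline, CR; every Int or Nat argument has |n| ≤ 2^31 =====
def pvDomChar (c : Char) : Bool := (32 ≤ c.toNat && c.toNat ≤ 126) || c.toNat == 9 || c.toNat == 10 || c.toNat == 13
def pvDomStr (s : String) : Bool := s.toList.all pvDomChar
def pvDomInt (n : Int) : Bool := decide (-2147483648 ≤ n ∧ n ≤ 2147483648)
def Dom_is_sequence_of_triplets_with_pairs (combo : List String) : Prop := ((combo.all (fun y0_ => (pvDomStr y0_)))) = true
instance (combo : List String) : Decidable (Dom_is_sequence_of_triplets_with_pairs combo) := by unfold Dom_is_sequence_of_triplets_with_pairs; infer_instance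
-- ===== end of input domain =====

-- B replaces A's sort-and-adjacent-scan consecutiveness test (and A's three extra passes over
-- combo / the dict) by a single pass over the counter's items collecting triplet rank indices,
-- finishing with a max-min contiguity check: simpler, one traversal instead of five.

-- ===== PORT A =====
def RANK_ORDER : List String := ["3","4","5","6","7","8","9","10","J","Q","K","A","2","B","R"]

-- sorted_cards: Python raises ValueError on an invalid card (`none` here); inside A it is only
-- called on already-validated cards, so the `none` branch is unreachable there.
def sorted_cards? (cards : List String) : Option (List String) :=
  if cards.all (fun card => RANK_ORDER.contains card) then
    some (RANK_ORDER.foldl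
      (fun acc rank => cards.foldl (fun a card => if card == rank then a ++ [card] else a) acc) [])
  else none

-- get_rank: `none` exactly where Python raises ValueError (unreachable on validated cards)
def get_rank? (card : String) : Option Nat := PySem.List.index? RANK_ORDER card

def is_sequence_of_triplets_with_pairs (combo : List String) : Bool :=
  if ¬ (combo.all (fun card => RANK_ORDER.contains card)) then false else
  let rank_counts : PySem.Dict String Int :=
    combo.foldl (fun d card =>
      if (d.get? card).isNone then d.insert card 1 else d.modify card 0 (· + 1))
      PySem.Dict.empty
  if ¬ (combo.all (fun card => rank_counts.getD card 0 == 3 || rank_counts.getD card 0 == 2))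
    then false else
  let tp := rank_counts.items.foldl
    (fun (tp : List String × List String) kv =>
      if kv.2 == 3 then (tp.1 ++ [kv.1], tp.2)
      else if kv.2 == 2 then (tp.1, tp.2 ++ [kv.1])
      else tp) ([], [])
  if tp.1.length ≠ tp.2.length then false else
  if tp.1.contains "2" then false else
  if tp.1.length < 2 then false else
  match sorted_cards? tp.1 with
  | none => false   -- unreachable: tp.1 was validated above
  | some st =>
    (List.range (st.length - 1)).all (fun i =>
      match PySem.List.pyGet? st (i : Int), PySem.List.pyGet? st ((i : Int) + 1) with
      | some a, some b =>
        match get_rank? a, get_rank? b with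
        | some ra, some rb => (ra : Int) == (rb : Int) - 1
        | _, _ => false   -- unreachable: st holds valid cards
      | _, _ => false       -- unreachable: i, i+1 < st.length
      )

-- ===== PORT B =====
def RANK_ORDER_B : List String := ["3","4","5","6","7","8","9","10","J","Q","K","A","2","B","R"]

-- the items loop of B: none = early `return False`
def bCollect : List (String × Int) → List Int → Int → Option (List Int × Int)
  | [], trips, np => some (trips, np)
  | (rank, c) :: rest, trips, np =>
    match PySem.List.index? RANK_ORDER_B rank with
    | none => none                                  -- rank not in RANK_ORDER
    | some i =>
      if c == 3 then
        if rank == "2" then none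
        else bCollect rest (trips ++ [(i : Int)]) np
      else if c == 2 then bCollect rest trips (np + 1)
      else none

def is_sequence_of_triplets_with_pairs_alt (combo : List String) : Bool :=
  let counts : PySem.Dict String Int :=
    combo.foldl (fun d card => d.insert card (d.getD card 0 + 1)) PySem.Dict.empty
  match bCollect counts.items [] 0 with
  | none => false
  | some (trips, np) =>
    if (trips.length : Int) ≠ np ∨ trips.length < 2 then false
    else
      match PySem.List.max? trips id with
      | none => false     -- unreachable: trips is nonempty here
      | some hi =>
        match PySem.List.min? trips id with
        | none => false   -- unreachable: trips is nonempty here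
        | some lo => hi - lo == (trips.length : Int) - 1

-- ===== PRECONDITION & SPEC =====
def Spec_is_sequence_of_triplets_with_pairs (combo : List String) (out : Bool) : Prop := out = is_sequence_of_triplets_with_pairs_alt combo
instance (combo : List String) (out : Bool) : Decidable (Spec_is_sequence_of_triplets_with_pairs combo out) := by unfold Spec_is_sequence_of_triplets_with_pairs; infer_instance

-- ===== CLAIM (what is proved, stated in full; the proofs are below) =====
def Claim_equal_is_sequence_of_triplets_with_pairs : Prop := ∀ (combo : List String), Dom_is_sequence_of_triplets_with_pairs combo → Spec_is_sequence_of_triplets_with_pairs combo (is_sequence_of_triplets_with_pairs combo)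

-- ===== LEMMAS AND PROOFS =====

-- rank index as an Int (the value A compares and B stores)
def rIdxI (r : String) : Int := (RANK_ORDER.idxOf r : Int)

-- an item (rank, count) of the counter that B's loop passes without an early `return False`
def goodItem (p : String × Int) : Bool :=
  decide (p.1 ∈ RANK_ORDER) && ((p.2 == 3 && !(p.1 == "2")) || p.2 == 2)

lemma stepA_eq (d : PySem.Dict String Int) (c : String) :
    (if (d.get? c).isNone then d.insert c 1 else d.modify c 0 (· + 1)) = d.modify c 0 (· + 1) := by
  by_cases h : (d.get? c).isNone
  · have h0 : d.getD c 0 = 0 := by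
      simp [PySem.Dict.getD, Option.isNone_iff_eq_none.mp h]
    simp [PySem.Dict.modify, h, h0]
  · simp [h]

lemma dictA_eq (combo : List String) :
    combo.foldl (fun d card =>
      if (d.get? card).isNone then d.insert card 1 else d.modify card 0 (· + 1))
      PySem.Dict.empty = PySem.Dict.counter combo := by
  rw [PySem.Dict.counter_eq_foldl]
  simp only [stepA_eq]

lemma tpFold_eq (l : List (String × Int)) (t p : List String) :
    l.foldl (fun tp kv =>
      if kv.2 == 3 then (tp.1 ++ [kv.1], tp.2)
      else if kv.2 == 2 then (tp.1, tp.2 ++ [kv.1])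
      else tp) (t, p)
    = (t ++ ((l.filter (fun kv => kv.2 == 3)).map (·.1)),
       p ++ ((l.filter (fun kv => kv.2 == 2)).map (·.1))) := by
  induction l generalizing t p with
  | nil => simp
  | cons kv rest ih =>
    simp only [List.foldl_cons]
    by_cases h3 : (kv.2 == 3) = true
    · rw [if_pos h3, ih]
      have h2 : ¬ ((kv.2 == 2) = true) := by simp_all
      simp [List.filter_cons, h3, h2]
    · by_cases h2 : (kv.2 == 2) = true
      · rw [if_neg h3, if_pos h2, ih]; simp [List.filter_cons, h3, h2]
      · rw [if_neg h3, if_neg h2, ih]; simp [List.filter_cons, h3, h2]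

lemma idxOf?_mem {α : Type} [BEq α] [LawfulBEq α] (l : List α) (r : α) (h : r ∈ l) :
    List.idxOf? r l = some (List.idxOf r l) := by
  induction l with
  | nil => simp at h
  | cons a t ih =>
    by_cases har : a == r
    · simp [List.idxOf?_cons, List.idxOf_cons, har, eq_of_beq har]
    · have hrt : r ∈ t := by
        rcases List.mem_cons.mp h with h' | h'
        · exact absurd (by simp [h']) har
        · exact h'
      simp [List.idxOf?_cons, List.idxOf_cons, har, ih hrt]

lemma index?_eq_some_idxOf (r : String) (h : r ∈ RANK_ORDER) :
    PySem.List.index? RANK_ORDER r = some (RANK_ORDER.idxOf r) := by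
  show List.idxOf? r RANK_ORDER = some (RANK_ORDER.idxOf r)
  exact idxOf?_mem _ _ h

lemma bCollect_eq (l : List (String × Int)) (trips : List Int) (np : Int) :
    bCollect l trips np = if l.all goodItem
      then some (trips ++ (l.filter (fun p => p.2 == 3)).map (fun p => rIdxI p.1),
                 np + (l.countP (fun p => p.2 == 2) : Int))
      else none := by
  induction l generalizing trips np with
  | nil => simp [bCollect]
  | cons q rest ih =>
    obtain ⟨rank, c⟩ := q
    show (match PySem.List.index? RANK_ORDER_B rank with
      | none => none
      | some i =>
        if c == 3 then
          if rank == "2" then none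
          else bCollect rest (trips ++ [(i : Int)]) np
        else if c == 2 then bCollect rest trips (np + 1)
        else none) = _
    rw [show RANK_ORDER_B = RANK_ORDER from rfl]
    by_cases hmem : rank ∈ RANK_ORDER
    · rw [index?_eq_some_idxOf rank hmem]
      by_cases h3 : (c == 3) = true
      · by_cases h2' : (rank == "2") = true
        · have hg : goodItem (rank, c) = false := by
            simp [goodItem, h3, h2']
            intro _
            rw [eq_of_beq h3]
            norm_num
          simp [h3, h2', List.all_cons, hg]
        · have hg : goodItem (rank, c) = true := by
            simp [goodItem, hmem, h3, h2']
          have hc2 : (c == 2) = false := by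
            rw [eq_of_beq h3]; norm_num
          simp [h3, h2', ih, List.all_cons, hg, hc2, rIdxI]
          simp only [hg, Bool.true_and]
      · by_cases h2 : (c == 2) = true
        · have hg : goodItem (rank, c) = true := by simp [goodItem, hmem, h2]
          have h3' : (c == 3) = false := by simpa using h3
          simp [h3', h2, ih, List.all_cons, hg]
          simp only [hg, Bool.true_and]
          split_ifs
          · simp only [Option.some.injEq, Prod.mk.injEq]
            constructor
            · trivial
            · ring
          · rfl
        · have hg : goodItem (rank, c) = false := by simp [goodItem, h3, h2]
          have h3' : (c == 3) = false := by simpa using h3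
          have h2'' : (c == 2) = false := by simpa using h2
          simp [h3', h2'', List.all_cons, hg]
    · rw [(PySem.List.index?_eq_none_iff _ _).mpr hmem]
      have hg : goodItem (rank, c) = false := by simp [goodItem, hmem]
      simp [List.all_cons, hg]

lemma filter_beq_of_nodup (T : List String) (h : T.Nodup) (a : String) :
    T.filter (· == a) = if a ∈ T then [a] else [] := by
  induction T with
  | nil => simp
  | cons b t ih =>
    rcases List.nodup_cons.mp h with ⟨hb, ht⟩
    by_cases hba : b = a
    · subst hba
      simp [List.filter_cons, ih ht, hb]
    · have : ¬ ((b == a) = true) := by simpa using hba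
      simp only [List.filter_cons, this, if_neg]
      rw [ih ht]
      have : (a ∈ b :: t) ↔ a ∈ t := by
        constructor
        · intro h'; rcases List.mem_cons.mp h' with h'' | h''
          · exact absurd h''.symm hba
          · exact h''
        · exact fun h' => List.mem_cons_of_mem _ h'
      by_cases hat : a ∈ t <;> simp [hat, this]

lemma flatMap_filter (ro T : List String) (h : T.Nodup) :
    ro.flatMap (fun rank => T.filter (fun c => c == rank)) = ro.filter (fun r => T.contains r) := by
  induction ro with
  | nil => simp
  | cons r ro ih =>
    rw [List.flatMap_cons, List.filter_cons, ih]
    rw [filter_beq_of_nodup T h r]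
    by_cases hr : r ∈ T <;> simp [hr]

lemma sorted_cards_eq (T : List String) (hnd : T.Nodup) (hsub : ∀ r ∈ T, r ∈ RANK_ORDER) :
    sorted_cards? T = some (RANK_ORDER.filter (fun r => T.contains r)) := by
  unfold sorted_cards?
  rw [if_pos]
  · congr 1
    have hcong : (RANK_ORDER.foldl (fun acc rank => T.foldl (fun a card => if card == rank then a ++ [card] else a) acc) ([] : List String))
        = RANK_ORDER.foldl (fun acc rank => acc ++ T.filter (fun c => c == rank)) [] := by
      apply PySem.List.foldl_congr_mem
      intro acc x _
      exact PySem.List.foldl_append_if_eq_filter _ _ _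
    rw [hcong, PySem.List.foldl_append_eq_flatMap, List.nil_append]
    exact flatMap_filter _ _ hnd
  · simp only [List.all_eq_true]
    intro r hr
    simpa using hsub r hr

lemma adjBool_eq_chain (st : List String) (hmem : ∀ r ∈ st, r ∈ RANK_ORDER) :
    ((List.range (st.length - 1)).all (fun i =>
      match PySem.List.pyGet? st (i : Int), PySem.List.pyGet? st ((i : Int) + 1) with
      | some a, some b =>
        match get_rank? a, get_rank? b with
        | some ra, some rb => (ra : Int) == (rb : Int) - 1
        | _, _ => false
      | _, _ => false))
    = decide (st.IsChain (fun a b => rIdxI a = rIdxI b - 1)) := by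
  have key : ∀ i, (hi : i + 1 < st.length) →
      ((match PySem.List.pyGet? st (i : Int), PySem.List.pyGet? st ((i : Int) + 1) with
        | some a, some b =>
          match get_rank? a, get_rank? b with
          | some ra, some rb => (ra : Int) == (rb : Int) - 1
          | _, _ => false
        | _, _ => false) = true ↔ rIdxI st[i] = rIdxI st[i + 1] - 1) := by
    intro i hi
    have e1 : PySem.List.pyGet? st (i : Int) = some st[i] := by
      rw [PySem.List.pyGet?_natCast]
      exact List.getElem?_eq_getElem (by omega)
    have e2 : PySem.List.pyGet? st ((i : Int) + 1) = some st[i + 1] := by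
      have hcast : ((i : Int) + 1) = ((i + 1 : Nat) : Int) := by push_cast; ring
      rw [hcast, PySem.List.pyGet?_natCast]
      exact List.getElem?_eq_getElem hi
    have e3 : get_rank? st[i] = some (RANK_ORDER.idxOf st[i]) :=
      index?_eq_some_idxOf _ (hmem _ (List.getElem_mem _))
    have e4 : get_rank? st[i + 1] = some (RANK_ORDER.idxOf st[i + 1]) :=
      index?_eq_some_idxOf _ (hmem _ (List.getElem_mem _))
    rw [e1, e2]
    simp only [e3, e4, beq_iff_eq, rIdxI]
  rw [Bool.eq_iff_iff]
  simp only [List.all_eq_true, List.mem_range, decide_eq_true_eq]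
  rw [List.isChain_iff_getElem]
  constructor
  · intro H i hi
    exact (key i hi).mp (H i (by omega))
  · intro H i hi
    exact (key i (by omega)).mpr (H i (by omega))

lemma min?_eq_of_perm (l l' : List Int) (h : l.Perm l') :
    PySem.List.min? l id = PySem.List.min? l' id := by
  rcases hm : PySem.List.min? l id with _ | m
  · rw [PySem.List.min?_eq_none_iff] at hm
    subst hm
    rw [(PySem.List.min?_eq_none_iff _ _).mpr h.symm.eq_nil]
  · rcases hm' : PySem.List.min? l' id with _ | m'
    · rw [PySem.List.min?_eq_none_iff] at hm'
      subst hm'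
      rw [h.eq_nil] at hm
      simp [PySem.List.min?] at hm
    · have h1 := PySem.List.min?_isMin hm m' (h.mem_iff.mpr (PySem.List.min?_mem hm'))
      have h2 := PySem.List.min?_isMin hm' m (h.mem_iff.mp (PySem.List.min?_mem hm))
      simp only [id] at h1 h2
      rw [le_antisymm h1 h2]

lemma max?_eq_of_perm (l l' : List Int) (h : l.Perm l') :
    PySem.List.max? l id = PySem.List.max? l' id := by
  rcases hm : PySem.List.max? l id with _ | m
  · rw [PySem.List.max?_eq_none_iff] at hm
    subst hm
    rw [(PySem.List.max?_eq_none_iff _ _).mpr h.symm.eq_nil]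
  · rcases hm' : PySem.List.max? l' id with _ | m'
    · rw [PySem.List.max?_eq_none_iff] at hm'
      subst hm'
      rw [h.eq_nil] at hm
      simp [PySem.List.max?] at hm
    · have h1 := PySem.List.max?_isMax hm m' (h.mem_iff.mpr (PySem.List.max?_mem hm'))
      have h2 := PySem.List.max?_isMax hm' m (h.mem_iff.mp (PySem.List.max?_mem hm))
      simp only [id] at h1 h2
      rw [le_antisymm h2 h1]

lemma chain_lt_min (l : List Int) (h : l ≠ []) (hc : l.IsChain (· < ·)) :
    PySem.List.min? l id = some (l.head h) := by
  have hpw : l.Pairwise (· < ·) := List.isChain_iff_pairwise.mp hc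
  rcases hm : PySem.List.min? l id with _ | m
  · rw [PySem.List.min?_eq_none_iff] at hm; exact absurd hm h
  · have hmem := PySem.List.min?_mem hm
    have hmin := PySem.List.min?_isMin hm
    rcases l with _ | ⟨a, t⟩
    · simp at h
    · simp only [List.head_cons, Option.some.injEq]
      rcases List.mem_cons.mp hmem with h' | h'
    -- m = a or m ∈ t
      · exact h'
      · have : a < m := (List.pairwise_cons.mp hpw).1 m h'
        have : m ≤ a := by simpa using hmin a (List.mem_cons_self)
        omega

lemma chain_lt_max (l : List Int) (h : l ≠ []) (hc : l.IsChain (· < ·)) :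
    PySem.List.max? l id = some (l.getLast h) := by
  have hpw : l.Pairwise (· < ·) := List.isChain_iff_pairwise.mp hc
  rcases hm : PySem.List.max? l id with _ | m
  · rw [PySem.List.max?_eq_none_iff] at hm; exact absurd hm h
  · have hmem := PySem.List.max?_mem hm
    have hmax := PySem.List.max?_isMax hm
    simp only [Option.some.injEq]
    have hlastmem : l.getLast h ∈ l := List.getLast_mem h
    have h1 : l.getLast h ≤ m := by simpa using hmax _ hlastmem
    -- m ≤ getLast: m = l[i], getLast = l[len-1]
    rcases List.mem_iff_getElem.mp hmem with ⟨i, hi, hmi⟩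
    have hlast : l.getLast h = l[l.length - 1] := List.getLast_eq_getElem h
    by_cases hil : i = l.length - 1
    · rw [hlast, ← hmi]
      subst hil
      rfl
    · have hilt : i < l.length - 1 := by omega
      have := List.pairwise_iff_getElem.mp hpw i (l.length - 1) hi (by omega) (by omega)
      rw [hmi, ← hlast] at this
      omega

lemma chain_lt_last_sub_head : ∀ (l : List Int) (h : l ≠ []) (_hc : l.IsChain (· < ·)),
    (l.length : Int) - 1 ≤ l.getLast h - l.head h
  | [a], _, _ => by simp
  | a :: b :: t, _, hc => by
    rcases List.isChain_cons_cons.mp hc with ⟨hab, hc'⟩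
    have ih := chain_lt_last_sub_head (b :: t) (by simp) hc'
    rw [List.getLast_cons (by simp), List.head_cons]
    simp only [List.head_cons, List.length_cons] at ih ⊢
    push_cast at ih ⊢
    omega
  | [], h, _ => absurd rfl h

lemma coreIff : ∀ (l : List Int) (h : l ≠ []) (hc : l.IsChain (· < ·)),
    (l.IsChain (fun a b => a = b - 1) ↔ l.getLast h - l.head h = (l.length : Int) - 1)
  | [a], _, _ => by simp
  | a :: b :: t, _, hc => by
    rcases List.isChain_cons_cons.mp hc with ⟨hab, hc'⟩
    have ih := coreIff (b :: t) (by simp) hc'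
    have hge := chain_lt_last_sub_head (b :: t) (by simp) hc'
    rw [List.getLast_cons (by simp), List.head_cons, List.isChain_cons_cons]
    simp only [List.head_cons, List.length_cons] at ih hge ⊢
    constructor
    · rintro ⟨h1, h2⟩
      have := ih.mp h2
      push_cast
      omega
    · intro hsum
      push_cast at hsum hge ⊢
      have hb : a = b - 1 := by omega
      refine ⟨hb, ih.mpr ?_⟩
      omega
  | [], h, _ => absurd rfl h

lemma rank_order_pairwise : RANK_ORDER.Pairwise (fun a b => rIdxI a < rIdxI b) := by decide

lemma rank_order_nodup : RANK_ORDER.Nodup := by decide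

-- ===== VERDICT (by name: the statement is the Claim_ definition above) =====
lemma allGood_false_of_bad (combo : List String) (c : String) (hc : c ∈ combo)
    (hbad : goodItem (c, (List.count c combo : Int)) = false) :
    (List.map (fun k => (k, ((List.count k combo : Int)))) (PySem.Set.ofList combo)).all goodItem = false := by
  apply Bool.eq_false_iff.mpr
  intro hall
  rw [List.all_eq_true] at hall
  have hcS : c ∈ PySem.Set.ofList combo := (PySem.Set.mem_ofList _ _).mpr hc
  have := hall _ (List.mem_map_of_mem hcS)
  rw [hbad] at this
  exact Bool.false_ne_true this

theorem is_sequence_of_triplets_with_pairs_spec : Claim_equal_is_sequence_of_triplets_with_pairs := by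
  intro combo _
  unfold Spec_is_sequence_of_triplets_with_pairs
  simp only [is_sequence_of_triplets_with_pairs, is_sequence_of_triplets_with_pairs_alt]
  rw [dictA_eq, PySem.Dict.foldl_insert_getD_add_one_eq_counter]
  rw [PySem.Dict.items_counter, bCollect_eq, tpFold_eq]
  simp only [PySem.Dict.getD_counter, List.filter_map, List.countP_map, List.map_map,
    List.nil_append, Function.comp_def, List.map_id']
  by_cases hva : (combo.all fun card => RANK_ORDER.contains card) = true
  case neg =>
    rw [if_pos hva]
    obtain ⟨c, hcmem, hcnot⟩ : ∃ c ∈ combo, ¬ c ∈ RANK_ORDER := by simpa using hva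
    rw [allGood_false_of_bad combo c hcmem (by simp [goodItem, hcnot])]
    simp
  case pos =>
  rw [if_neg (not_not_intro hva)]
  have hvalid : ∀ c ∈ combo, c ∈ RANK_ORDER := by simpa using hva
  by_cases hok : (combo.all fun card => ((List.count card combo : Int) == 3 || (List.count card combo : Int) == 2)) = true
  case neg =>
    rw [if_pos hok]
    obtain ⟨c, hcmem, hcbad⟩ : ∃ c ∈ combo,
        ¬ ((List.count c combo : Int) == 3 || (List.count c combo : Int) == 2) = true := by
      simpa using hok
    rw [allGood_false_of_bad combo c hcmem (by simp [goodItem]; simp at hcbad; intro _; omega)]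
    simp
  case pos =>
  rw [if_neg (not_not_intro hok)]
  have hcnt : ∀ c ∈ combo, (List.count c combo : Int) = 3 ∨ (List.count c combo : Int) = 2 := by
    simpa using hok
  by_cases h2t : "2" ∈ combo ∧ (List.count "2" combo : Int) = 3
  case pos =>
    -- the "2"-triplet case: both programs return false
    rw [allGood_false_of_bad combo "2" h2t.1 (by simp [goodItem, h2t.2])]
    have h2T : "2" ∈ List.filter (fun x => (List.count x combo : Int) == 3) (PySem.Set.ofList combo) := by
      rw [List.mem_filter]
      exact ⟨(PySem.Set.mem_ofList _ _).mpr h2t.1, by simp [h2t.2]⟩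
    have hT2 : (List.filter (fun x => (List.count x combo : Int) == 3) (PySem.Set.ofList combo)).contains "2" = true :=
      List.elem_eq_true_of_mem h2T
    by_cases hlen : (List.filter (fun x => (List.count x combo : Int) == 3) (PySem.Set.ofList combo)).length ≠ (List.filter (fun x => (List.count x combo : Int) == 2) (PySem.Set.ofList combo)).length
    · rw [if_pos hlen]; simp
    · rw [if_neg hlen, hT2]; simp
  case neg =>
  have hgood : (List.map (fun k => (k, ((List.count k combo : Int)))) (PySem.Set.ofList combo)).all goodItem = true := by
    rw [List.all_eq_true]
    rintro p hp
    obtain ⟨k, hkS, rfl⟩ := List.mem_map.mp hp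
    have hkc : k ∈ combo := (PySem.Set.mem_ofList _ _).mp hkS
    have hkR := hvalid k hkc
    rcases hcnt k hkc with h3 | h2
    · have hk2 : k ≠ "2" := by rintro rfl; exact h2t ⟨hkc, h3⟩
      simp [goodItem, hkR, h3, hk2]
    · simp [goodItem, hkR, h2]
  rw [hgood, if_pos rfl]
  simp only []
  set T := List.filter (fun x => (List.count x combo : Int) == 3) (PySem.Set.ofList combo) with hTdef
  set P := List.filter (fun x => (List.count x combo : Int) == 2) (PySem.Set.ofList combo) with hPdef
  have hTnd : T.Nodup := List.Nodup.filter _ (PySem.Set.nodup_ofList combo)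
  have hTsub : ∀ r ∈ T, r ∈ RANK_ORDER := by
    intro r hr
    exact hvalid r ((PySem.Set.mem_ofList _ _).mp (List.mem_filter.mp hr).1)
  have hPcount : List.countP (fun x => (List.count x combo : Int) == 2) (PySem.Set.ofList combo) = P.length := by
    rw [hPdef, List.countP_eq_length_filter]
  by_cases hlen : T.length = P.length
  case neg =>
    rw [if_pos hlen]
    have hBc : ((T.map rIdxI).length : Int) ≠ 0 + (List.countP (fun x => (List.count x combo : Int) == 2) (PySem.Set.ofList combo) : Int) ∨ (T.map rIdxI).length < 2 := by
      left
      rw [List.length_map, hPcount]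
      push_cast
      omega
    rw [if_pos hBc]
  case pos =>
  have hc2f : T.contains "2" = false := by
    apply Bool.eq_false_iff.mpr
    intro hc
    have hmem2 := List.mem_filter.mp (List.mem_of_elem_eq_true hc)
    exact h2t ⟨(PySem.Set.mem_ofList _ _).mp hmem2.1, by simpa using hmem2.2⟩
  rw [if_neg (fun h => h hlen), hc2f]
  simp only [Bool.false_eq_true, if_false]
  by_cases hlen2 : T.length < 2
  case pos =>
    rw [if_pos hlen2]
    have hBc : ((T.map rIdxI).length : Int) ≠ 0 + (List.countP (fun x => (List.count x combo : Int) == 2) (PySem.Set.ofList combo) : Int) ∨ (T.map rIdxI).length < 2 := by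
      right; rw [List.length_map]; exact hlen2
    rw [if_pos hBc]
  case neg =>
  rw [if_neg hlen2]
  simp only [sorted_cards_eq T hTnd hTsub]
  set F := RANK_ORDER.filter (fun r => T.contains r) with hFdef
  have hFnd : F.Nodup := List.Nodup.filter _ rank_order_nodup
  have hpermTF : T.Perm F := by
    rw [List.perm_ext_iff_of_nodup hTnd hFnd]
    intro a
    constructor
    · intro ha
      rw [hFdef, List.mem_filter]
      exact ⟨hTsub a ha, List.elem_eq_true_of_mem ha⟩
    · intro ha
      rw [hFdef, List.mem_filter] at ha
      exact List.mem_of_elem_eq_true ha.2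
  have hFsub : ∀ r ∈ F, r ∈ RANK_ORDER := fun r hr => (List.mem_filter.mp hr).1
  rw [adjBool_eq_chain F hFsub]
  have hBne : ¬ (((T.map rIdxI).length : Int) ≠ 0 + (List.countP (fun x => (List.count x combo : Int) == 2) (PySem.Set.ofList combo) : Int) ∨ (T.map rIdxI).length < 2) := by
    rw [List.length_map, hPcount]
    push_cast
    omega
  rw [if_neg hBne]
  have hchainF : F.IsChain (fun a b => rIdxI a < rIdxI b) :=
    List.Pairwise.isChain (List.Pairwise.filter _ rank_order_pairwise)
  have hchainJ : (F.map rIdxI).IsChain (· < ·) := (List.isChain_map _).mpr hchainF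
  have hperm : (T.map rIdxI).Perm (F.map rIdxI) := hpermTF.map _
  have hJne : F.map rIdxI ≠ [] := by
    refine List.ne_nil_of_length_pos ?_
    rw [List.length_map, ← hpermTF.length_eq]
    omega
  rw [max?_eq_of_perm _ _ hperm, min?_eq_of_perm _ _ hperm,
      chain_lt_max _ hJne hchainJ, chain_lt_min _ hJne hchainJ]
  rw [Bool.eq_iff_iff]
  simp only [decide_eq_true_eq, beq_iff_eq]
  rw [← List.isChain_map (R := fun a b : Int => a = b - 1) rIdxI]
  rw [coreIff _ hJne hchainJ]
  rw [List.length_map, List.length_map, hpermTF.length_eq]
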